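-- pv_equiv track=rewrite | github.com/Vinicius203/Codeforces_Contests | 856_Div2/tempCodeRunnerFile.py | verifyPalindrome
-- ===== SOURCE A (Python) =====
-- def verifyPalindrome(string):
--     contador = 0
--     string_reversed = []
--     for i in range(0, len(string)):
--         string_reversed.append(string[i][::-1])
--
--     for i in range (0, len(string)):
--         for j in range (len(string_reversed)):
--             if (string[i] == string[j] and i != j):
--                 contador += 1
--                 break
--
--     return contador
-- ===== SOURCE B (Python) =====
-- def verifyPalindrome(string):
--     counts = {}
--     for s in string:
--         counts[s] = counts.get(s, 0) + 1
--     total = 0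
--     for c in counts.values():
--         if c >= 2:
--             total += c
--     return total
-- ===== Notes on version B (the rewrite author's own statement) =====
-- stated objective: faster
-- what changed: B drops A's dead reversed-string loop and replaces the nested index rescan by a single-pass count dictionary whose values >= 2 are summed.
import Mathlib
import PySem

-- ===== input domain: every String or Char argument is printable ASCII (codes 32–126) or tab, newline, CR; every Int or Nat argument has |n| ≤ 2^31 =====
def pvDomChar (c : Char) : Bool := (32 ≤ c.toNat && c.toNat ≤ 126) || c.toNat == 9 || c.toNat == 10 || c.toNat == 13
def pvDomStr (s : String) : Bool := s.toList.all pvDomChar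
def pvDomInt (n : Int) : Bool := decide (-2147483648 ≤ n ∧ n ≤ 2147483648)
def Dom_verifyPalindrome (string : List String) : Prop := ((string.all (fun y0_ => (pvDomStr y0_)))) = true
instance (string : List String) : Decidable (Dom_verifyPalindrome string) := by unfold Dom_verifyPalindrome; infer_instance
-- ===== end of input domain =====

-- B replaces A's quadratic nested index rescan (and drops its dead reversed-string loop)
-- by a single-pass count dictionary whose values ≥ 2 are summed; return value only.

-- ===== PORT A =====
-- the dead first loop: string_reversed.append(string[i][::-1])  (s[::-1] ported exactly as reversal of the char list)
def pvRevLoopA (string : List String) : List String :=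
  (PySem.List.pyRange 0 string.length 1).foldl
    (fun acc i => acc ++ [String.mk ((PySem.List.pyGetD string i "").toList.reverse)]) []

def verifyPalindrome (string : List String) : Int :=
  let string_reversed := pvRevLoopA string
  -- inner 'for j … if …: contador += 1; break' = first-match scan, contributes one
  (PySem.List.pyRange 0 string.length 1).foldl
    (fun contador i =>
      if (PySem.List.pyRange 0 (string_reversed.length : Int) 1).any
           (fun j => (PySem.List.pyGetD string i "" == PySem.List.pyGetD string j "") && (i != j))
      then contador + 1 else contador) 0

-- ===== PORT B =====
def verifyPalindrome_alt (string : List String) : Int :=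
  let counts : PySem.Dict String Int :=
    string.foldl (fun d s => d.insert s (d.getD s 0 + 1)) PySem.Dict.empty
  counts.values.foldl (fun total c => if 2 ≤ c then total + c else total) 0

-- ===== PRECONDITION & SPEC =====
def Spec_verifyPalindrome (string : List String) (out : Int) : Prop := out = verifyPalindrome_alt string
instance (string : List String) (out : Int) : Decidable (Spec_verifyPalindrome string out) := by unfold Spec_verifyPalindrome; infer_instance

-- ===== CLAIM (what is proved, stated in full; the proofs are below) =====
def Claim_equal_verifyPalindrome : Prop := ∀ (string : List String), Dom_verifyPalindrome string → Spec_verifyPalindrome string (verifyPalindrome string)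

-- ===== LEMMAS AND PROOFS =====

-- foldl +1-under-if is countP
theorem pv_foldl_if_count (L : List Int) (P : Int → Bool) (a : Int) :
    L.foldl (fun acc i => if P i then acc + 1 else acc) a = a + (L.countP P : Int) := by
  induction L generalizing a with
  | nil => simp
  | cons x xs ih =>
    by_cases h : P x = true <;> simp [List.countP_cons, h, ih] <;> push_cast <;> ring

-- foldl add-under-if is sum of filter
theorem pv_foldl_if_sum (L : List Int) (a : Int) :
    L.foldl (fun acc c => if 2 ≤ c then acc + c else acc) a = a + (L.filter (fun c => 2 ≤ c)).sum := by
  induction L generalizing a with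
  | nil => simp
  | cons x xs ih =>
    by_cases h : (2:Int) ≤ x <;> simp [h, ih] <;> ring

theorem pv_countP_split (L : List String) (p : String → Bool) (k : String) :
    L.countP p = L.countP (fun a => p a && a == k) + L.countP (fun a => p a && a != k) := by
  induction L with
  | nil => simp
  | cons x xs ih =>
    by_cases hp : p x = true <;> by_cases hk : x = k <;>
      simp [List.countP_cons, hp, hk, ih] <;> omega

theorem pv_countP_and_eq (L : List String) (p : String → Bool) (k : String) :
    L.countP (fun a => p a && a == k) = if p k then L.count k else 0 := by
  induction L with
  | nil => simp
  | cons x xs ih =>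
    by_cases hk : x = k
    · subst hk; by_cases hp : p x = true <;> simp [List.countP_cons, List.count_cons, hp, ih]
    · simp [List.countP_cons, List.count_cons, hk, ih, Ne.symm hk]

theorem pv_countP_and_ne (L : List String) (p : String → Bool) (k : String) :
    L.countP (fun a => p a && a != k) = (L.filter (fun a => a != k)).countP p := by
  rw [List.countP_filter]

-- countP over a nodup covering list of keys, as a sum of counts
theorem pv_countP_eq_sum (ks : List String) (p : String → Bool) (L : List String)
    (hnd : ks.Nodup) (hcov : ∀ a ∈ L, p a = true → a ∈ ks) :
    L.countP p = ((ks.filter p).map (fun k => L.count k)).sum := by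
  induction ks generalizing L with
  | nil =>
    simp only [List.filter_nil, List.map_nil, List.sum_nil]
    exact List.countP_eq_zero.mpr (fun a ha h => absurd (hcov a ha h) (List.not_mem_nil))
  | cons k ks ih =>
    have hk : k ∉ ks := (List.nodup_cons.mp hnd).1
    have hnd' : ks.Nodup := (List.nodup_cons.mp hnd).2
    set L' := L.filter (fun a => a != k) with hL'
    have hcov' : ∀ a ∈ L', p a = true → a ∈ ks := by
      intro a ha hp
      have hmem := List.mem_filter.mp ha
      have := hcov a hmem.1 hp
      rcases List.mem_cons.mp this with h | h
      · exact absurd h (by simpa using hmem.2)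
      · exact h
    have hcount : ∀ k' ∈ ks, L'.count k' = L.count k' := by
      intro k' hk'
      have hne : (k' != k) = true := by
        simp only [bne_iff_ne, ne_eq]; rintro rfl; exact hk hk'
      rw [hL', List.count_filter]; simp [hne]
    have key : L.countP p = (if p k then L.count k else 0) + L'.countP p := by
      rw [pv_countP_split L p k, pv_countP_and_eq, pv_countP_and_ne]
    have hmap : (ks.filter p).map (fun k' => L'.count k') = (ks.filter p).map (fun k' => L.count k') :=
      List.map_congr_left (fun k' hk' => hcount k' (List.mem_of_mem_filter hk'))
    rw [key, ih L' hnd' hcov', hmap]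
    by_cases hp : p k = true <;> simp [List.filter_cons, hp]

-- membership-based characterisation: some other index holds the same value
theorem pv_two_le_count_iff (xs : List String) (i : Nat) (hi : i < xs.length) :
    2 ≤ xs.count xs[i] ↔ ∃ j, ∃ hj : j < xs.length, j ≠ i ∧ xs[j] = xs[i] := by
  have hsplit : xs.count xs[i] = (xs.take i).count xs[i] + 1 + (xs.drop (i+1)).count xs[i] := by
    have haux : ∀ v, v = xs[i] → xs.count v = (xs.take i).count v + 1 + (xs.drop (i+1)).count v := by
      intro v hv
      conv_lhs => rw [← List.take_append_drop i xs]
      rw [List.count_append, ← List.getElem_cons_drop (as := xs) (i := i) (h := hi), List.count_cons]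
      simp [hv]
      omega
    exact haux xs[i] rfl
  constructor
  · intro h2
    have h1 : 1 ≤ (xs.take i).count xs[i] + (xs.drop (i+1)).count xs[i] := by omega
    rcases Nat.lt_or_ge 0 ((xs.take i).count xs[i]) with hpos | hz
    · have hm : xs[i] ∈ xs.take i := List.count_pos_iff.mp hpos
      obtain ⟨j, hj, hje⟩ := List.mem_iff_getElem.mp hm
      have hjlen : j < i := by
        have := hj; simp [List.length_take] at this; omega
      refine ⟨j, by omega, by omega, ?_⟩
      rw [← hje, List.getElem_take]
    · have hpos' : 0 < (xs.drop (i+1)).count xs[i] := by omega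
      have hm : xs[i] ∈ xs.drop (i+1) := List.count_pos_iff.mp hpos'
      obtain ⟨j, hj, hje⟩ := List.mem_iff_getElem.mp hm
      have hjlen : i + 1 + j < xs.length := by
        have := hj; simp [List.length_drop] at this; omega
      refine ⟨i + 1 + j, hjlen, by omega, ?_⟩
      rw [← hje, List.getElem_drop]
  · rintro ⟨j, hj, hne, hvj⟩
    suffices h : 1 ≤ (xs.take i).count xs[i] + (xs.drop (i+1)).count xs[i] by omega
    rcases Nat.lt_or_ge j i with hlt | hge
    · have hb : j < (xs.take i).length := by simp [List.length_take]; omega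
      have hmem : xs[i] ∈ xs.take i := by
        have hge2 : (xs.take i)[j]'hb = xs[i] := by rw [List.getElem_take]; exact hvj
        exact hge2 ▸ List.getElem_mem hb
      have := List.count_pos_iff.mpr hmem; omega
    · have hgt : i < j := by omega
      have hb : j - (i+1) < (xs.drop (i+1)).length := by simp [List.length_drop]; omega
      have hmem : xs[i] ∈ xs.drop (i+1) := by
        have hge2 : (xs.drop (i+1))[j - (i+1)]'hb = xs[i] := by
          rw [List.getElem_drop]
          have : i + 1 + (j - (i+1)) = j := by omega
          simp_rw [this]; exact hvj
        exact hge2 ▸ List.getElem_mem hb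
      have := List.count_pos_iff.mpr hmem; omega

theorem pv_revloop_len (xs : List String) : (pvRevLoopA xs).length = xs.length := by
  unfold pvRevLoopA
  rw [PySem.List.foldl_append_singleton_eq_map]
  simp [PySem.List.length_pyRange_one]

theorem pv_A_countP (xs : List String) :
    verifyPalindrome xs = ((PySem.List.pyRange 0 (xs.length : Int) 1).countP
      (fun i => decide (2 ≤ xs.count (PySem.List.pyGetD xs i ""))) : Int) := by
  simp only [verifyPalindrome, pv_revloop_len]
  rw [pv_foldl_if_count]
  rw [List.countP_congr ?_]
  · ring
  intro i hi
  obtain ⟨h0, hn⟩ := (PySem.List.mem_pyRange_one).mp hi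
  have hit : i.toNat < xs.length := by omega
  have hgi : PySem.List.pyGetD xs i "" = xs[i.toNat] :=
    PySem.List.pyGetD_eq_getElem xs "" h0 (by exact_mod_cast hn)
  have hiff : ((PySem.List.pyRange 0 ((xs.length : Int)) 1).any
      (fun j => (PySem.List.pyGetD xs i "" == PySem.List.pyGetD xs j "") && (i != j)) = true)
      ↔ 2 ≤ xs.count (PySem.List.pyGetD xs i "") := by
    rw [List.any_eq_true, hgi]
    constructor
    · rintro ⟨j, hjmem, hj⟩
      obtain ⟨hj0, hjn⟩ := (PySem.List.mem_pyRange_one).mp hjmem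
      have hjt : j.toNat < xs.length := by omega
      simp only [Bool.and_eq_true, beq_iff_eq, bne_iff_ne, ne_eq] at hj
      have hgj : PySem.List.pyGetD xs j "" = xs[j.toNat] :=
        PySem.List.pyGetD_eq_getElem xs "" hj0 (by exact_mod_cast hjn)
      rw [hgj] at hj
      refine (pv_two_le_count_iff xs i.toNat hit).mpr ⟨j.toNat, hjt, ?_, hj.1.symm⟩
      intro h; exact hj.2 (by omega)
    · intro h2
      obtain ⟨j, hj, hne, hje⟩ := (pv_two_le_count_iff xs i.toNat hit).mp h2
      refine ⟨(j : Int), (PySem.List.mem_pyRange_one).mpr ⟨by omega, by exact_mod_cast hj⟩, ?_⟩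
      have hgj : PySem.List.pyGetD xs (j : Int) "" = xs[j] := by
        rw [PySem.List.pyGetD_eq_getElem xs "" (by omega) (by exact_mod_cast hj)]
        simp
      simp only [Bool.and_eq_true, beq_iff_eq, bne_iff_ne, ne_eq, hgj]
      exact ⟨hje.symm, by omega⟩
  rw [decide_eq_true_eq]
  exact hiff

theorem pv_B_sum (xs : List String) :
    verifyPalindrome_alt xs =
      (((PySem.Set.ofList xs).map (fun k => (xs.count k : Int))).filter (fun c => 2 ≤ c)).sum := by
  have hv : (PySem.Dict.counter xs).values = (PySem.Set.ofList xs).map (fun k => (xs.count k : Int)) := by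
    simp only [PySem.Dict.values, PySem.Dict.items_counter, List.map_map]
    rfl
  simp only [verifyPalindrome_alt, PySem.Dict.foldl_insert_getD_add_one_eq_counter, hv]
  rw [pv_foldl_if_sum]
  ring

theorem verifyPalindrome_spec' : ∀ xs : List String, verifyPalindrome xs = verifyPalindrome_alt xs := by
  intro xs
  rw [pv_A_countP, pv_B_sum]
  -- move the A-side countP from indices to the list itself
  have hmap : (PySem.List.pyRange 0 ((xs.length : Int)) 1).map (fun j => PySem.List.pyGetD xs j "") = xs :=
    PySem.List.map_pyGetD_pyRange_zero' xs ""
  have hA : (PySem.List.pyRange 0 (xs.length : Int) 1).countP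
      (fun i => decide (2 ≤ xs.count (PySem.List.pyGetD xs i ""))) =
      xs.countP (fun s => decide (2 ≤ xs.count s)) := by
    have hcm := List.countP_map (p := fun s => decide (2 ≤ xs.count s))
      (f := fun j => PySem.List.pyGetD xs j "") (l := PySem.List.pyRange 0 ((xs.length : Int)) 1)
    rw [hmap] at hcm
    exact hcm.symm
  rw [hA]
  -- B side: push the filter through the map and drop the casts
  have hfil : ((PySem.Set.ofList xs).map (fun k => (xs.count k : Int))).filter (fun c => 2 ≤ c) =
      ((PySem.Set.ofList xs).filter (fun k => decide (2 ≤ xs.count k))).map (fun k => (xs.count k : Int)) := by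
    rw [List.filter_map]
    congr 1
    apply List.filter_congr
    intro k _
    simp only [Function.comp_apply, decide_eq_decide]
    exact_mod_cast Iff.rfl
  rw [hfil]
  have hsum : (((PySem.Set.ofList xs).filter (fun k => decide (2 ≤ xs.count k))).map
      (fun k => (xs.count k : Int))).sum =
      ((((PySem.Set.ofList xs).filter (fun k => decide (2 ≤ xs.count k))).map
      (fun k => xs.count k)).sum : Int) := by
    rw [Nat.cast_list_sum, List.map_map]
    rfl
  rw [hsum]
  congr 1
  exact pv_countP_eq_sum (PySem.Set.ofList xs) (fun s => decide (2 ≤ xs.count s)) xs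
    (PySem.Set.nodup_ofList xs) (fun a ha _ => (PySem.Set.mem_ofList xs a).mpr ha)

-- ===== VERDICT (by name: the statement is the Claim_ definition above) =====
theorem verifyPalindrome_spec : Claim_equal_verifyPalindrome := by
  intro xs _; exact (verifyPalindrome_spec' xs).symm ▸ rfl
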